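-- pv_equiv track=rewrite | github.com/CatDumb/Code-Advent | 2024/Week 2/day9_p2.py | identify_blocks
-- ===== SOURCE A (Python) =====
-- def identify_blocks(list):
--     free_blocks = []
--     taken_blocks = []
--
--     free_start = 0
--     while free_start < len(list):
--         # Find the start of the free block
--         while free_start < len(list) and list[free_start] != '.':
--             free_start += 1
--
--         if free_start >= len(list):
--             break
--
--         # Find the end of the free block
--         free_end = free_start
--         while free_end < len(list) and list[free_end] == '.':
--             free_end += 1
--
--         free_length = free_end - free_start
--         free_blocks.append((free_start, free_length))
--
--         free_start = free_end
--
--     taken_start = 0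
--     while taken_start < len(list):
--         # Find the start of the taken block
--         while taken_start < len(list) and list[taken_start] == '.':
--             taken_start += 1
--
--         if taken_start >= len(list):
--             break
--
--         # Find the end of the taken block
--         taken_end = taken_start
--         while taken_end < len(list) and list[taken_end] == list[taken_start]:
--             taken_end += 1
--
--         taken_length = taken_end - taken_start
--         taken_blocks.append((taken_start, taken_length))
--
--         taken_start = taken_end
--
--     return free_blocks, taken_blocks
-- ===== SOURCE B (Python) =====
-- def identify_blocks(list):
--     free_blocks = []
--     taken_blocks = []
--     i = 0
--     n = len(list)
--     while i < n:
--         j = i + 1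
--         while j < n and list[j] == list[i]:
--             j += 1
--         if list[i] == '.':
--             free_blocks.append((i, j - i))
--         else:
--             taken_blocks.append((i, j - i))
--         i = j
--     return free_blocks, taken_blocks
-- ===== Notes on version B (the rewrite author's own statement) =====
-- stated objective: faster
-- what changed: Replaces A's two separate scanning passes (one for free runs, one for taken runs) with a single pass that walks maximal runs of equal elements once and dispatches each run to the free or taken list.
import Mathlib
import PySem

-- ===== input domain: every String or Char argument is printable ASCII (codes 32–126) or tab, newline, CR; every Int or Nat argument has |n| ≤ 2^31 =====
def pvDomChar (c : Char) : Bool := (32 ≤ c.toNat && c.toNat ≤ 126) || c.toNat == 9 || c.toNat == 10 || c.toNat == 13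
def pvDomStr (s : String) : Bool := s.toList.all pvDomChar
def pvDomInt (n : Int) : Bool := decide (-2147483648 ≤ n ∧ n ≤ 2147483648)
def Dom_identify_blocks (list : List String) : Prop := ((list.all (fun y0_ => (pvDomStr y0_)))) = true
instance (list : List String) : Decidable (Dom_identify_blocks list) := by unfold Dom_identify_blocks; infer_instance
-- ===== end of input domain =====

-- B replaces A's two separate scanning passes (free runs, then taken runs) by one single
-- pass over maximal runs of equal elements, dispatching each run to the free or taken list
-- (alternative decomposition, same asymptotic cost). All loops are ported with a fuel
-- parameter (l.length + 1 is always sufficient, each step advances the index).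

-- ===== PORT A =====
-- inner `while free_start < len(list) and list[free_start] != '.'`
def pvScanNotDot (l : List String) : Nat → Nat → Nat
  | 0, i => i
  | fuel + 1, i => if i < l.length ∧ l.getD i "" ≠ "." then pvScanNotDot l fuel (i + 1) else i

-- inner `while free_end < len(list) and list[free_end] == '.'`
def pvScanDot (l : List String) : Nat → Nat → Nat
  | 0, i => i
  | fuel + 1, i => if i < l.length ∧ l.getD i "" = "." then pvScanDot l fuel (i + 1) else i

-- inner `while taken_end < len(list) and list[taken_end] == list[taken_start]`
def pvScanSame (l : List String) (v : String) : Nat → Nat → Nat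
  | 0, i => i
  | fuel + 1, i => if i < l.length ∧ l.getD i "" = v then pvScanSame l v fuel (i + 1) else i

-- outer while loop of A's first half (free blocks)
def pvFreeLoop (l : List String) : Nat → Nat → List (Int × Int) → List (Int × Int)
  | 0, _, acc => acc
  | fuel + 1, i, acc =>
    let s := pvScanNotDot l (l.length + 1) i
    if s < l.length then
      let e := pvScanDot l (l.length + 1) s
      pvFreeLoop l fuel e (acc ++ [((s : Int), (e : Int) - (s : Int))])
    else acc

-- outer while loop of A's second half (taken blocks)
def pvTakenLoop (l : List String) : Nat → Nat → List (Int × Int) → List (Int × Int)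
  | 0, _, acc => acc
  | fuel + 1, i, acc =>
    let s := pvScanDot l (l.length + 1) i
    if s < l.length then
      let e := pvScanSame l (l.getD s "") (l.length + 1) s
      pvTakenLoop l fuel e (acc ++ [((s : Int), (e : Int) - (s : Int))])
    else acc

def identify_blocks (list : List String) : (List (Int × Int)) × (List (Int × Int)) :=
  (pvFreeLoop list (list.length + 1) 0 [], pvTakenLoop list (list.length + 1) 0 [])

-- ===== PORT B =====
-- inner `while j < n and list[j] == list[i]` (v = list[i])
def pvRunEnd (l : List String) (v : String) : Nat → Nat → Nat
  | 0, j => j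
  | fuel + 1, j => if j < l.length ∧ l.getD j "" = v then pvRunEnd l v fuel (j + 1) else j

-- B's single while loop
def pvOneLoop (l : List String) : Nat → Nat → List (Int × Int) → List (Int × Int) →
    (List (Int × Int)) × (List (Int × Int))
  | 0, _, free, taken => (free, taken)
  | fuel + 1, i, free, taken =>
    if i < l.length then
      let j := pvRunEnd l (l.getD i "") (l.length + 1) (i + 1)
      if l.getD i "" = "." then
        pvOneLoop l fuel j (free ++ [((i : Int), (j : Int) - (i : Int))]) taken
      else
        pvOneLoop l fuel j free (taken ++ [((i : Int), (j : Int) - (i : Int))])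
    else (free, taken)

def identify_blocks_alt (list : List String) : (List (Int × Int)) × (List (Int × Int)) :=
  pvOneLoop list (list.length + 1) 0 [] []

-- ===== PRECONDITION & SPEC =====
def Spec_identify_blocks (list : List String) (out : (List (Int × Int)) × (List (Int × Int))) : Prop := out = identify_blocks_alt list
instance (list : List String) (out : (List (Int × Int)) × (List (Int × Int))) : Decidable (Spec_identify_blocks list out) := by unfold Spec_identify_blocks; infer_instance

-- ===== CLAIM (what is proved, stated in full; the proofs are below) =====
def Claim_equal_identify_blocks : Prop := ∀ (list : List String), Dom_identify_blocks list → Spec_identify_blocks list (identify_blocks list)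

-- ===== LEMMAS AND PROOFS =====

-- scans do nothing past the end of the list
theorem pvScanNotDot_idle (l : List String) (fuel i : Nat) (h : l.length ≤ i) :
    pvScanNotDot l fuel i = i := by
  cases fuel with
  | zero => rfl
  | succ g => rw [pvScanNotDot, if_neg (fun hc => absurd hc.1 (by omega))]

theorem pvScanDot_idle (l : List String) (fuel i : Nat) (h : l.length ≤ i) :
    pvScanDot l fuel i = i := by
  cases fuel with
  | zero => rfl
  | succ g => rw [pvScanDot, if_neg (fun hc => absurd hc.1 (by omega))]

-- scans never move backwards
theorem pvScanNotDot_ge (l : List String) (fuel : Nat) : ∀ i, i ≤ pvScanNotDot l fuel i := by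
  induction fuel with
  | zero => intro i; rfl
  | succ g ih =>
    intro i
    rw [pvScanNotDot]
    split
    · have := ih (i + 1); omega
    · omega

theorem pvScanDot_ge (l : List String) (fuel : Nat) : ∀ i, i ≤ pvScanDot l fuel i := by
  induction fuel with
  | zero => intro i; rfl
  | succ g ih =>
    intro i
    rw [pvScanDot]
    split
    · have := ih (i + 1); omega
    · omega

theorem pvScanSame_ge (l : List String) (v : String) (fuel : Nat) :
    ∀ i, i ≤ pvScanSame l v fuel i := by
  induction fuel with
  | zero => intro i; rfl
  | succ g ih =>
    intro i
    rw [pvScanSame]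
    split
    · have := ih (i + 1); omega
    · omega

theorem pvRunEnd_ge (l : List String) (v : String) (fuel : Nat) :
    ∀ j, j ≤ pvRunEnd l v fuel j := by
  induction fuel with
  | zero => intro j; rfl
  | succ g ih =>
    intro j
    rw [pvRunEnd]
    split
    · have := ih (j + 1); omega
    · omega

-- with enough fuel the scans reach a genuine stop position
theorem pvScanNotDot_stop (l : List String) (fuel : Nat) :
    ∀ i, l.length ≤ i + fuel →
    ¬(pvScanNotDot l fuel i < l.length ∧ l.getD (pvScanNotDot l fuel i) "" ≠ ".") := by
  induction fuel with
  | zero => intro i hf hc; exact absurd hc.1 (by simp [pvScanNotDot]; omega)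
  | succ g ih =>
    intro i hf
    rw [pvScanNotDot]
    split
    · exact ih (i + 1) (by omega)
    · assumption

theorem pvScanDot_stop (l : List String) (fuel : Nat) :
    ∀ i, l.length ≤ i + fuel →
    ¬(pvScanDot l fuel i < l.length ∧ l.getD (pvScanDot l fuel i) "" = ".") := by
  induction fuel with
  | zero => intro i hf hc; exact absurd hc.1 (by simp [pvScanDot]; omega)
  | succ g ih =>
    intro i hf
    rw [pvScanDot]
    split
    · exact ih (i + 1) (by omega)
    · assumption

-- pvScanDot / pvScanSame are the same scans as B's pvRunEnd (at equal fuel)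
theorem pvScanDot_eq_runEnd (l : List String) (fuel : Nat) :
    ∀ i, pvScanDot l fuel i = pvRunEnd l "." fuel i := by
  induction fuel with
  | zero => intro i; rfl
  | succ g ih =>
    intro i
    rw [pvScanDot, pvRunEnd]
    split
    · exact ih (i + 1)
    · rfl

theorem pvScanSame_eq_runEnd (l : List String) (v : String) (fuel : Nat) :
    ∀ i, pvScanSame l v fuel i = pvRunEnd l v fuel i := by
  induction fuel with
  | zero => intro i; rfl
  | succ g ih =>
    intro i
    rw [pvScanSame, pvRunEnd]
    split
    · exact ih (i + 1)
    · rfl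

-- fuel irrelevance (as long as it is enough)
theorem pvRunEnd_stable (l : List String) (v : String) (fuel : Nat) :
    ∀ fuel' i, l.length ≤ i + fuel → l.length ≤ i + fuel' →
    pvRunEnd l v fuel i = pvRunEnd l v fuel' i := by
  induction fuel with
  | zero =>
    intro fuel' i hf hf'
    rw [pvRunEnd.eq_1]
    cases fuel' with
    | zero => rfl
    | succ g => rw [pvRunEnd, if_neg (fun hc => absurd hc.1 (by omega))]
  | succ g ih =>
    intro fuel' i hf hf'
    rw [pvRunEnd]
    split
    · rename_i h
      cases fuel' with
      | zero => exact absurd h.1 (by omega)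
      | succ g' =>
        rw [pvRunEnd, if_pos h]
        exact ih g' (i + 1) (by omega) (by omega)
    · rename_i h
      cases fuel' with
      | zero => rfl
      | succ g' => rw [pvRunEnd, if_neg h]

theorem pvScanNotDot_stable (l : List String) (fuel : Nat) :
    ∀ fuel' i, l.length ≤ i + fuel → l.length ≤ i + fuel' →
    pvScanNotDot l fuel i = pvScanNotDot l fuel' i := by
  induction fuel with
  | zero =>
    intro fuel' i hf hf'
    rw [pvScanNotDot.eq_1]
    cases fuel' with
    | zero => rfl
    | succ g => rw [pvScanNotDot, if_neg (fun hc => absurd hc.1 (by omega))]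
  | succ g ih =>
    intro fuel' i hf hf'
    rw [pvScanNotDot]
    split
    · rename_i h
      cases fuel' with
      | zero => exact absurd h.1 (by omega)
      | succ g' =>
        rw [pvScanNotDot, if_pos h]
        exact ih g' (i + 1) (by omega) (by omega)
    · rename_i h
      cases fuel' with
      | zero => rfl
      | succ g' => rw [pvScanNotDot, if_neg h]

-- every position B's scan passed over holds the value v
theorem pvRunEnd_range (l : List String) (v : String) (fuel : Nat) :
    ∀ i k, i ≤ k → k < pvRunEnd l v fuel i → k < l.length ∧ l.getD k "" = v := by
  induction fuel with
  | zero => intro i k hk1 hk2; rw [pvRunEnd.eq_1] at hk2; omega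
  | succ g ih =>
    intro i k hk1 hk2
    rw [pvRunEnd] at hk2
    split at hk2
    · rename_i h
      rcases Nat.eq_or_lt_of_le hk1 with rfl | hlt
      · exact h
      · exact ih (i + 1) k hlt hk2
    · omega

-- skipping a stretch of non-dot positions does not change pvScanNotDot (at full fuel)
theorem pvScanNotDot_skip (l : List String) (j : Nat) :
    ∀ i, i ≤ j → (∀ k, i ≤ k → k < j → k < l.length ∧ l.getD k "" ≠ ".") →
    pvScanNotDot l (l.length + 1) i = pvScanNotDot l (l.length + 1) j
  | i, hle, hall =>
    if h : i = j then by rw [h]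
    else by
      have hlt : i < j := lt_of_le_of_ne hle h
      have hi := hall i le_rfl hlt
      rw [pvScanNotDot, if_pos hi]
      rw [pvScanNotDot_stable l l.length (l.length + 1) (i + 1) (by omega) (by omega)]
      exact pvScanNotDot_skip l j (i + 1) hlt (fun k hk1 hk2 => hall k (by omega) hk2)
termination_by i => j - i
decreasing_by omega

-- pvScanDot at full fuel is a fixpoint of itself
theorem pvScanDot_fix (l : List String) (i : Nat) :
    pvScanDot l (l.length + 1) (pvScanDot l (l.length + 1) i) = pvScanDot l (l.length + 1) i := by
  rw [pvScanDot, if_neg (pvScanDot_stop l (l.length + 1) i (by omega))]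

-- the outer loops depend on i only through their leading scan
theorem pvTakenLoop_congr (l : List String) (fuel i j : Nat) (t : List (Int × Int))
    (h : pvScanDot l (l.length + 1) i = pvScanDot l (l.length + 1) j) :
    pvTakenLoop l (fuel + 1) i t = pvTakenLoop l (fuel + 1) j t := by
  rw [pvTakenLoop]
  conv_rhs => rw [pvTakenLoop]
  rw [h]

theorem pvFreeLoop_congr (l : List String) (fuel i j : Nat) (f : List (Int × Int))
    (h : pvScanNotDot l (l.length + 1) i = pvScanNotDot l (l.length + 1) j) :
    pvFreeLoop l (fuel + 1) i f = pvFreeLoop l (fuel + 1) j f := by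
  rw [pvFreeLoop]
  conv_rhs => rw [pvFreeLoop]
  rw [h]

-- fuel irrelevance of the outer loops
theorem pvFreeLoop_stable (l : List String) (fuel : Nat) :
    ∀ fuel' i acc, l.length ≤ i + fuel → l.length ≤ i + fuel' →
    pvFreeLoop l fuel i acc = pvFreeLoop l fuel' i acc := by
  induction fuel with
  | zero =>
    intro fuel' i acc hf hf'
    rw [pvFreeLoop.eq_1]
    cases fuel' with
    | zero => rfl
    | succ g =>
      rw [pvFreeLoop, pvScanNotDot_idle l (l.length + 1) i (by omega),
        if_neg (by omega)]
  | succ g ih =>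
    intro fuel' i acc hf hf'
    rw [pvFreeLoop]
    split
    · rename_i hs
      have hge := pvScanNotDot_ge l (l.length + 1) i
      cases fuel' with
      | zero => exact absurd hs (by rw [pvScanNotDot_idle l _ i (by omega)]; omega)
      | succ g' =>
        rw [pvFreeLoop, if_pos hs]
        have hd : l.getD (pvScanNotDot l (l.length + 1) i) "" = "." := by
          by_contra hne
          exact pvScanNotDot_stop l (l.length + 1) i (by omega) ⟨hs, hne⟩
        have he : pvScanNotDot l (l.length + 1) i <
            pvScanDot l (l.length + 1) (pvScanNotDot l (l.length + 1) i) := by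
          rw [pvScanDot, if_pos ⟨hs, hd⟩]
          have := pvScanDot_ge l l.length (pvScanNotDot l (l.length + 1) i + 1); omega
        exact ih g' _ _ (by omega) (by omega)
    · rename_i hs
      cases fuel' with
      | zero => rfl
      | succ g' => rw [pvFreeLoop, if_neg hs]

theorem pvTakenLoop_stable (l : List String) (fuel : Nat) :
    ∀ fuel' i acc, l.length ≤ i + fuel → l.length ≤ i + fuel' →
    pvTakenLoop l fuel i acc = pvTakenLoop l fuel' i acc := by
  induction fuel with
  | zero =>
    intro fuel' i acc hf hf'
    rw [pvTakenLoop.eq_1]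
    cases fuel' with
    | zero => rfl
    | succ g =>
      rw [pvTakenLoop, pvScanDot_idle l (l.length + 1) i (by omega), if_neg (by omega)]
  | succ g ih =>
    intro fuel' i acc hf hf'
    rw [pvTakenLoop]
    split
    · rename_i hs
      have hge := pvScanDot_ge l (l.length + 1) i
      cases fuel' with
      | zero => exact absurd hs (by rw [pvScanDot_idle l _ i (by omega)]; omega)
      | succ g' =>
        rw [pvTakenLoop, if_pos hs]
        have he : pvScanDot l (l.length + 1) i <
            pvScanSame l (l.getD (pvScanDot l (l.length + 1) i) "") (l.length + 1)
              (pvScanDot l (l.length + 1) i) := by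
          rw [pvScanSame, if_pos ⟨hs, rfl⟩]
          have := pvScanSame_ge l (l.getD (pvScanDot l (l.length + 1) i) "") l.length
            (pvScanDot l (l.length + 1) i + 1)
          omega
        exact ih g' _ _ (by omega) (by omega)
    · rename_i hs
      cases fuel' with
      | zero => rfl
      | succ g' => rw [pvTakenLoop, if_neg hs]

-- main invariant: B's single loop computes both of A's passes at once (same enough fuel)
theorem pvMain (l : List String) (fuel : Nat) :
    ∀ i f t, l.length ≤ i + fuel →
    pvOneLoop l fuel i f t = (pvFreeLoop l fuel i f, pvTakenLoop l fuel i t) := by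
  induction fuel with
  | zero => intro i f t hf; rfl
  | succ fuel ih =>
    intro i f t hf
    by_cases hi : i < l.length
    · have hjge := pvRunEnd_ge l (l.getD i "") (l.length + 1) (i + 1)
      by_cases hdot : l.getD i "" = "."
      · -- current element is ".": B emits a free block
        rw [pvOneLoop, if_pos hi, if_pos hdot,
          ih _ _ _ (by omega)]
        have hsd : pvScanDot l (l.length + 1) i =
            pvRunEnd l (l.getD i "") (l.length + 1) (i + 1) := by
          rw [pvScanDot, if_pos ⟨hi, hdot⟩, pvScanDot_eq_runEnd, hdot]
          exact pvRunEnd_stable l "." l.length (l.length + 1) (i + 1) (by omega) (by omega)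
        simp only [Prod.mk.injEq]
        refine ⟨?_, ?_⟩
        · -- free components agree
          have hsnd : pvScanNotDot l (l.length + 1) i = i := by
            rw [pvScanNotDot.eq_2, if_neg (fun hc => hc.2 hdot)]
          conv_rhs => rw [pvFreeLoop]
          rw [hsnd, if_pos hi, hsd]
        · -- A's taken pass skips the dot run
          have hcongr := pvTakenLoop_congr l fuel i
            (pvRunEnd l (l.getD i "") (l.length + 1) (i + 1)) t (by rw [hsd, ← hsd, pvScanDot_fix])
          rw [hcongr]
          exact (pvTakenLoop_stable l fuel (fuel + 1)
            (pvRunEnd l (l.getD i "") (l.length + 1) (i + 1)) t (by omega) (by omega))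
      · -- current element is not ".": B emits a taken block
        rw [pvOneLoop, if_pos hi, if_neg hdot,
          ih _ _ _ (by omega)]
        have hss : pvScanSame l (l.getD i "") (l.length + 1) i =
            pvRunEnd l (l.getD i "") (l.length + 1) (i + 1) := by
          rw [pvScanSame, if_pos ⟨hi, rfl⟩, pvScanSame_eq_runEnd]
          exact pvRunEnd_stable l (l.getD i "") l.length (l.length + 1) (i + 1)
            (by omega) (by omega)
        simp only [Prod.mk.injEq]
        refine ⟨?_, ?_⟩
        · -- A's free pass skips the non-dot run
          have hskip : pvScanNotDot l (l.length + 1) i =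
              pvScanNotDot l (l.length + 1) (pvRunEnd l (l.getD i "") (l.length + 1) (i + 1)) := by
            apply pvScanNotDot_skip l _ i (by omega)
            intro k hk1 hk2
            rcases Nat.eq_or_lt_of_le hk1 with rfl | hlt
            · exact ⟨hi, hdot⟩
            · have hr := pvRunEnd_range l (l.getD i "") (l.length + 1) (i + 1) k hlt hk2
              exact ⟨hr.1, fun he => hdot (hr.2 ▸ he : l.getD i "" = ".")⟩
          rw [pvFreeLoop_congr l fuel i
            (pvRunEnd l (l.getD i "") (l.length + 1) (i + 1)) f hskip]
          exact (pvFreeLoop_stable l fuel (fuel + 1)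
            (pvRunEnd l (l.getD i "") (l.length + 1) (i + 1)) f (by omega) (by omega))
        · -- taken components agree
          have hsdi : pvScanDot l (l.length + 1) i = i := by
            rw [pvScanDot.eq_2, if_neg (fun hc => hdot hc.2)]
          conv_rhs => rw [pvTakenLoop]
          rw [hsdi, if_pos hi, hss]
    · rw [pvOneLoop, if_neg hi, pvFreeLoop, pvTakenLoop,
        pvScanNotDot_idle l (l.length + 1) i (by omega),
        pvScanDot_idle l (l.length + 1) i (by omega), if_neg hi, if_neg hi]

-- ===== VERDICT (by name: the statement is the Claim_ definition above) =====
theorem identify_blocks_spec : Claim_equal_identify_blocks := by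
  intro l _
  unfold Spec_identify_blocks identify_blocks identify_blocks_alt
  exact (pvMain l (l.length + 1) 0 [] [] (by omega)).symm
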